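-- pv_equiv track=rewrite | github.com/PhantomX95/HackerRank | 30 Days of Code/Day 10 (Binary Numbers).py | max_num_consecutive
-- ===== SOURCE A (Python) =====
-- def max_num_consecutive(n):
--     binary = bin(int(n))[2:]
--     repeated = 1
--     max_num = 1
--
--     for i in range(1, len(binary)):
--         if binary[i] == binary[i - 1]:
--             repeated += 1
--             max_num = max(repeated, max_num)
--         else:
--             max(max_num, repeated)
--             repeated = 1
--
--     return max_num
-- ===== SOURCE B (Python) =====
-- def max_num_consecutive(n):
--     binary = bin(int(n))[2:]
--     runs = []
--     i = 0
--     while i < len(binary):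
--         j = i
--         while j < len(binary) and binary[j] == binary[i]:
--             j += 1
--         runs.append(j - i)
--         i = j
--     return max(runs)
-- ===== Notes on version B (the rewrite author's own statement) =====
-- stated objective: alternative
-- what changed: B first materializes the list of maximal-run lengths of the binary string (groupby-style takeWhile/dropWhile scan) and returns their max, instead of A's single pass maintaining a running counter and running maximum over adjacent character pairs.
import Mathlib
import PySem

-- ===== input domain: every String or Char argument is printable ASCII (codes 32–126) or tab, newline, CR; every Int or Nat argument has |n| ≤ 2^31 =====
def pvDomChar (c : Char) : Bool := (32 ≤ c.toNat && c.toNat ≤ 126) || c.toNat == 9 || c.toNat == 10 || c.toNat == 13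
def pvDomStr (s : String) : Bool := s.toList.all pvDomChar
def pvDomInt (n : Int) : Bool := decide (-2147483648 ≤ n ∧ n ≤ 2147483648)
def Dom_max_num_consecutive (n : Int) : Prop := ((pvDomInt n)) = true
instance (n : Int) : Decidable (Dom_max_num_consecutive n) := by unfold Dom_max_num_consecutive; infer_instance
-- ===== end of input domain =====

-- B materializes the list of maximal-run lengths of the binary string and takes their max,
-- instead of A's running counter/maximum over adjacent character pairs (alternative decomposition, same cost).


-- ===== PORT A =====
-- binary = bin(int(n))[2:] ; int(n) on an int is the identity
def max_num_consecutive (n : Int) : Int :=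
  let binary : List Char := PySem.List.slice (PySem.Int.toBinChars0b n) (some 2) none
  let st : Int × Int :=
    (PySem.List.pyRange 1 (PySem.List.len binary) 1).foldl
      (fun (s : Int × Int) i =>
        if PySem.List.pyGetD binary i ' ' = PySem.List.pyGetD binary (i - 1) ' ' then
          (s.1 + 1, max (s.1 + 1) s.2)
        else
          -- Python's bare 'max(max_num, repeated)' discards its result
          (1, s.2))
      (1, 1)
  st.2

-- ===== PORT B =====
-- the list of lengths of the maximal runs of equal characters (Source B's while-scan:
-- the inner while is the takeWhile, resuming the outer loop at j is the dropWhile)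
def pvRunLens : List Char → List Int
  | [] => []
  | c :: rest =>
      (1 + ((rest.takeWhile (· == c)).length : Int)) :: pvRunLens (rest.dropWhile (· == c))
termination_by cs => cs.length
decreasing_by
  have := List.length_dropWhile_le (· == c) rest
  simp only [List.length_cons]
  omega

def max_num_consecutive_alt (n : Int) : Int :=
  let binary : List Char := PySem.List.slice (PySem.Int.toBinChars0b n) (some 2) none
  match pvRunLens binary with
  | [] => 1              -- unreachable: binary is never empty (Python's max would raise)
  | h :: t => t.foldl max h

-- ===== PRECONDITION & SPEC =====
def Spec_max_num_consecutive (n : Int) (out : Int) : Prop := out = max_num_consecutive_alt n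
instance (n : Int) (out : Int) : Decidable (Spec_max_num_consecutive n out) := by unfold Spec_max_num_consecutive; infer_instance

-- ===== CLAIM (what is proved, stated in full; the proofs are below) =====
def Claim_equal_max_num_consecutive : Prop := ∀ (n : Int), Dom_max_num_consecutive n → Spec_max_num_consecutive n (max_num_consecutive n)

-- ===== LEMMAS AND PROOFS =====

lemma pvRunLens_nil : pvRunLens [] = [] := by rw [pvRunLens.eq_def]

lemma pvRunLens_cons (c : Char) (rest : List Char) :
    pvRunLens (c :: rest)
      = (1 + ((rest.takeWhile (· == c)).length : Int)) :: pvRunLens (rest.dropWhile (· == c)) := by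
  rw [pvRunLens.eq_def]

-- structural version of A's loop: state (repeated, max_num), prev = previously seen character
def pvLoopA (prev : Char) (l : List Char) (s : Int × Int) : Int × Int :=
  match l with
  | [] => s
  | c :: cs =>
      if c = prev then pvLoopA c cs (s.1 + 1, max (s.1 + 1) s.2)
      else pvLoopA c cs (1, s.2)

-- A's index fold over range(1, len(binary)) is pvLoopA, walking the list with the previous char
lemma pvFold_eq_loopA (l : List Char) : ∀ (pre : List Char) (prev : Char) (s : Int × Int),
    (PySem.List.pyRange ((pre.length : Int) + 1) (PySem.List.len (pre ++ prev :: l)) 1).foldl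
      (fun (s : Int × Int) i =>
        if PySem.List.pyGetD (pre ++ prev :: l) i ' ' = PySem.List.pyGetD (pre ++ prev :: l) (i - 1) ' ' then
          (s.1 + 1, max (s.1 + 1) s.2)
        else (1, s.2)) s
    = pvLoopA prev l s := by
  induction l with
  | nil =>
    intro pre prev s
    rw [PySem.List.pyRange_one_eq_nil (by simp)]
    simp [pvLoopA]
  | cons c cs ih =>
    intro pre prev s
    rw [PySem.List.pyRange_one_cons (by simp)]
    have hget : PySem.List.pyGetD (pre ++ prev :: c :: cs) ((pre.length : Int) + 1) ' ' = c := by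
      have h : ((pre.length : Int) + 1) = (((pre.length + 1 : Nat)) : Int) := by omega
      rw [h, PySem.List.pyGetD_natCast]
      simp [List.getD]
    have hget' : PySem.List.pyGetD (pre ++ prev :: c :: cs) ((pre.length : Int) + 1 - 1) ' ' = prev := by
      have h : ((pre.length : Int) + 1 - 1) = ((pre.length : Nat) : Int) := by omega
      rw [h, PySem.List.pyGetD_natCast]
      simp [List.getD]
    have hre : pre ++ prev :: c :: cs = (pre ++ [prev]) ++ c :: cs := by simp
    have hlen : (pre.length : Int) + 1 + 1 = (((pre ++ [prev]).length : Nat) : Int) + 1 := by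
      simp only [List.length_append, List.length_cons, List.length_nil]; omega
    simp only [List.foldl_cons, hget, hget']
    by_cases h : c = prev
    · simp only [if_pos h]
      rw [hlen, hre, ih (pre ++ [prev]) c]
      subst h
      simp [pvLoopA]
    · simp only [if_neg h]
      rw [hlen, hre, ih (pre ++ [prev]) c]
      conv_rhs => rw [pvLoopA]
      simp [h]

-- pvLoopA's max_num is the max of the run lengths, under the loop invariant 1 ≤ repeated ≤ max_num
lemma pvLoopA_eq_runLens (l : List Char) : ∀ (prev : Char) (rep mx : Int), 1 ≤ rep → rep ≤ mx →
    (pvLoopA prev l (rep, mx)).2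
      = (pvRunLens (l.dropWhile (· == prev))).foldl max
          (max mx (rep + ((l.takeWhile (· == prev)).length : Int))) := by
  induction l with
  | nil =>
    intro prev rep mx h1 h2
    simp only [pvLoopA, List.dropWhile_nil, List.takeWhile_nil, pvRunLens_nil, List.foldl_nil,
      List.length_nil, Nat.cast_zero, add_zero]
    omega
  | cons c cs ih =>
    intro prev rep mx h1 h2
    by_cases h : c = prev
    · subst h
      have hb : (c == c) = true := by simp
      simp only [pvLoopA, List.takeWhile_cons, List.dropWhile_cons, hb, if_true]
      rw [ih c (rep + 1) (max (rep + 1) mx) (by omega) (by omega)]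
      simp only [List.length_cons, Nat.cast_add, Nat.cast_one]
      congr 1
      omega
    · have hb : (c == prev) = false := by simp [h]
      simp only [pvLoopA, if_neg h, List.takeWhile_cons, List.dropWhile_cons, hb, Bool.false_eq_true, if_false]
      rw [ih c 1 mx (by omega) (by omega), pvRunLens_cons]
      simp only [List.foldl_cons, List.length_nil, Nat.cast_zero, add_zero]
      congr 1
      omega

-- the binary string bin(n)[2:] is never empty
lemma pvBinary_ne_nil (n : Int) :
    PySem.List.slice (PySem.Int.toBinChars0b n) (some 2) none ≠ [] := by
  have h2 : PySem.List.slice (PySem.Int.toBinChars0b n) (some 2) none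
      = (PySem.Int.toBinChars0b n).drop 2 := by
    rw [show (2 : Int) = ((2 : Nat) : Int) by norm_num, PySem.List.slice_from_natCast]
  have hlen : 3 ≤ (PySem.Int.toBinChars0b n).length := by
    unfold PySem.Int.toBinChars0b
    have g1 : 0 < (Nat.toDigits 2 n.natAbs).length := Nat.length_toDigits_pos
    have g2 : 0 < (Nat.toDigits 2 n.toNat).length := Nat.length_toDigits_pos
    split_ifs <;> simp only [List.length_cons] <;> omega
  intro hnil
  rw [h2] at hnil
  have := List.length_drop (l := PySem.Int.toBinChars0b n) (i := 2)
  rw [hnil] at this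
  simp only [List.length_nil] at this
  omega

-- ===== VERDICT (by name: the statement is the Claim_ definition above) =====
theorem max_num_consecutive_spec : Claim_equal_max_num_consecutive := by
  intro n _
  unfold Spec_max_num_consecutive max_num_consecutive max_num_consecutive_alt
  cases hb : PySem.List.slice (PySem.Int.toBinChars0b n) (some 2) none with
  | nil => exact absurd hb (pvBinary_ne_nil n)
  | cons c0 rest =>
    simp only
    have hfold := pvFold_eq_loopA rest [] c0 (1, 1)
    simp only [List.length_nil, Nat.cast_zero, zero_add, List.nil_append] at hfold
    refine (congrArg Prod.snd hfold).trans ?_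
    rw [pvLoopA_eq_runLens rest c0 1 1 (by omega) (by omega), pvRunLens_cons]
    have h1 : max (1 : Int) (1 + ((rest.takeWhile (· == c0)).length : Int))
        = 1 + ((rest.takeWhile (· == c0)).length : Int) := by omega
    rw [h1]
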